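-- pv_equiv track=rewrite | github.com/HackBulgaria/Programming0-1 | week4/solutions/winter.py | winter_is_coming
-- ===== SOURCE A (Python) =====
-- def winter_is_coming(seasons):
--     counter = 0
--
--     for season in seasons:
--         if season == "winter":
--             counter = 0
--         else:
--             counter += 1
--
--     return counter >= 5
-- ===== SOURCE B (Python) =====
-- def winter_is_coming(seasons):
--     return len(seasons) >= 5 and "winter" not in seasons[-5:]
-- ===== Notes on version B (the rewrite author's own statement) =====
-- stated objective: idiomatic
-- what changed: Replaced the counting loop (counter reset on 'winter') by the closed-form test len(seasons) >= 5 and 'winter' not in seasons[-5:], since the counter equals the length of the winter-free suffix.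
import Mathlib
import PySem

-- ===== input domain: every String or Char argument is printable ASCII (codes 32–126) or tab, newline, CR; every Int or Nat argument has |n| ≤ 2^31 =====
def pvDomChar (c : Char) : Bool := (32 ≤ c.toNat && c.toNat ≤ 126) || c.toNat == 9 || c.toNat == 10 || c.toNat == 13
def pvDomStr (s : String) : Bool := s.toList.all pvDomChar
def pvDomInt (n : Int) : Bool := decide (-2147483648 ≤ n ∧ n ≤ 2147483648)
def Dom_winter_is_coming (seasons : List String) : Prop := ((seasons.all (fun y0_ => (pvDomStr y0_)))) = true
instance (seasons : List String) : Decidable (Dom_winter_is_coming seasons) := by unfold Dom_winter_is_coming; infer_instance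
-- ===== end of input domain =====

-- B replaces A's reset-counter loop by the closed-form test "length ≥ 5 and no 'winter' in the last 5" (idiomatic rewrite).


-- ===== PORT A =====
def winter_is_coming (seasons : List String) : Bool :=
  let counter : Int := seasons.foldl (fun counter season => if season == "winter" then 0 else counter + 1) 0
  decide (5 ≤ counter)

-- ===== PORT B =====
def winter_is_coming_alt (seasons : List String) : Bool :=
  decide (5 ≤ seasons.length) && !((PySem.List.slice seasons (some (-5)) none).contains "winter")

-- ===== PRECONDITION & SPEC =====
def Spec_winter_is_coming (seasons : List String) (out : Bool) : Prop := out = winter_is_coming_alt seasons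
instance (seasons : List String) (out : Bool) : Decidable (Spec_winter_is_coming seasons out) := by unfold Spec_winter_is_coming; infer_instance

-- ===== CLAIM (what is proved, stated in full; the proofs are below) =====
def Claim_equal_winter_is_coming : Prop := ∀ (seasons : List String), Dom_winter_is_coming seasons → Spec_winter_is_coming seasons (winter_is_coming seasons)

-- ===== LEMMAS AND PROOFS =====

def pvCnt (l : List String) : Int :=
  l.foldl (fun counter season => if season == "winter" then 0 else counter + 1) 0

theorem pvCnt_append (l : List String) (x : String) :
    pvCnt (l ++ [x]) = if x == "winter" then 0 else pvCnt l + 1 := by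
  simp [pvCnt]

theorem pvCnt_nonneg (l : List String) : 0 ≤ pvCnt l := by
  induction l using List.reverseRecOn with
  | nil => simp [pvCnt]
  | append_singleton l y ih =>
      rw [pvCnt_append]
      by_cases hy : (y == "winter") = true <;> simp [hy] <;> omega

-- main characterisation: for k ≥ 1, counter ≥ k iff the list has ≥ k elements
-- and none of the last k is "winter"
theorem pvCnt_ge_iff (l : List String) : ∀ k : Nat, 1 ≤ k →
    ((k : Int) ≤ pvCnt l ↔ k ≤ l.length ∧ "winter" ∉ l.drop (l.length - k)) := by
  induction l using List.reverseRecOn with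
  | nil =>
      intro k hk
      simp only [pvCnt, List.foldl_nil, List.length_nil, List.drop_nil,
        List.not_mem_nil, not_false_iff, and_true]
      omega
  | append_singleton l x ih =>
      intro k hk
      rw [pvCnt_append]
      simp only [List.length_append, List.length_cons, List.length_nil, Nat.zero_add]
      by_cases hx : x = "winter"
      · subst hx
        simp only [beq_self_eq_true, if_true]
        constructor
        · intro h; exfalso; omega
        · rintro ⟨hlen, hnot⟩
          exfalso
          apply hnot
          rw [List.drop_append_of_le_length (by omega : l.length + 1 - k ≤ l.length)]
          simp
      · have hbeq : (x == "winter") = false := by simp [hx]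
        rw [hbeq]; simp only [Bool.false_eq_true, if_false]
        by_cases hk1 : k = 1
        · subst hk1
          constructor
          · intro _
            refine ⟨by omega, ?_⟩
            have heq : l.length + 1 - 1 = l.length := by omega
            rw [heq, List.drop_append_of_le_length (le_refl l.length), List.drop_length]
            simp only [List.nil_append, List.mem_singleton]
            exact fun h => hx h.symm
          · intro _
            have h0 := pvCnt_nonneg l
            omega
        · have hk2 : 2 ≤ k := by omega
          have ihk := ih (k - 1) (by omega)
          have hcast : ((k - 1 : Nat) : Int) = (k : Int) - 1 := by omega
          rw [hcast] at ihk
          constructor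
          · intro h
            have h' : (k : Int) - 1 ≤ pvCnt l := by omega
            obtain ⟨hlen, hnot⟩ := ihk.mp h'
            refine ⟨by omega, ?_⟩
            have heq : l.length + 1 - k = l.length - (k - 1) := by omega
            rw [List.drop_append_of_le_length (by omega : l.length + 1 - k ≤ l.length), heq]
            intro hmem
            rcases List.mem_append.mp hmem with h1 | h1
            · exact hnot h1
            · simp only [List.mem_singleton] at h1; exact hx h1.symm
          · rintro ⟨hlen, hnot⟩
            have heq : l.length + 1 - k = l.length - (k - 1) := by omega
            rw [List.drop_append_of_le_length (by omega : l.length + 1 - k ≤ l.length), heq] at hnot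
            have hnot' : "winter" ∉ l.drop (l.length - (k - 1)) := fun h => hnot (List.mem_append.mpr (Or.inl h))
            have := ihk.mpr ⟨by omega, hnot'⟩
            omega

-- ===== VERDICT (by name: the statement is the Claim_ definition above) =====
theorem winter_is_coming_spec : Claim_equal_winter_is_coming := by
  intro seasons _
  unfold Spec_winter_is_coming winter_is_coming winter_is_coming_alt
  rw [PySem.List.slice_from_neg_ofNat seasons 5 (by omega)]
  have h := pvCnt_ge_iff seasons 5 (by omega)
  simp only [pvCnt] at h
  simp only [beq_iff_eq] at h ⊢
  by_cases hc : (5 : Int) ≤ seasons.foldl (fun counter season => if season = "winter" then 0 else counter + 1) 0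
  · obtain ⟨hlen, hnot⟩ := h.mp hc
    simp [hc, hlen, hnot]
  · simp only [decide_eq_false hc]
    by_cases hlen : 5 ≤ seasons.length
    · have : "winter" ∈ seasons.drop (seasons.length - 5) := by
        by_contra hn
        exact hc (h.mpr ⟨hlen, hn⟩)
      simp [this]
    · simp [hlen]
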